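-- pv_equiv track=rewrite | github.com/emiferndz/Guia-2---Python | ejercicio9.py | calcular_impuestos
-- ===== SOURCE A (Python) =====
-- def calcular_impuestos(modelo, tipo):
--
--   antiguedad = 2024 - modelo
--
--   impuestos_base = 0
--
--   if tipo == "P":
--     if antiguedad < 10:
--       impuestos_base = 2000
--     elif antiguedad < 20:
--       impuestos_base = 1500
--   elif tipo == "T":
--     impuestos_base = calcular_impuestos(modelo, "P") + 1500
--   elif tipo == "R":
--     impuestos_base = antiguedad * 1000
--
--   return impuestos_base
-- ===== SOURCE B (Python) =====
-- def calcular_impuestos(modelo, tipo):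
--     antiguedad = 2024 - modelo
--     if tipo == "R":
--         return antiguedad * 1000
--     if tipo not in ("P", "T"):
--         return 0
--     base = 2000 if antiguedad < 10 else (1500 if antiguedad < 20 else 0)
--     return base + (1500 if tipo == "T" else 0)
-- ===== Notes on version B (the rewrite author's own statement) =====
-- stated objective: simpler
-- what changed: Replaces A's recursive self-call for tipo=='T' and the nested 'P' branch with a flat decomposition: one shared age-bracket base plus a 1500 surcharge when tipo=='T', with early returns for 'R' and unknown types.
import Mathlib
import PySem

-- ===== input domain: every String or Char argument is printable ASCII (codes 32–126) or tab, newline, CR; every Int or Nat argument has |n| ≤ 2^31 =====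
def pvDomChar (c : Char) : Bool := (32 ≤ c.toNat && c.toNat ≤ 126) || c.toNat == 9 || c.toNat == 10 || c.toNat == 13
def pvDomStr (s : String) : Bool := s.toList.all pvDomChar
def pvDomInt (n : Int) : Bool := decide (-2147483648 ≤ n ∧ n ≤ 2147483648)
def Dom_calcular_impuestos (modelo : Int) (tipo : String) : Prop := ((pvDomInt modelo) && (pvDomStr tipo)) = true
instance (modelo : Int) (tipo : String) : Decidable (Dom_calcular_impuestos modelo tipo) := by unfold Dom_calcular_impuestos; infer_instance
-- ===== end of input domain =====

-- B replaces A's recursive 'T' call and nested 'P' branch with a flat shared age-bracket base plus surcharge (simpler decomposition).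

-- ===== PORT A =====
def calcular_impuestos (modelo : Int) (tipo : String) : Int :=
  let antiguedad := 2024 - modelo
  let impuestos_base : Int := 0
  if tipo == "P" then
    (if antiguedad < 10 then 2000
     else if antiguedad < 20 then 1500
     else impuestos_base)
  else if tipo == "T" then
    calcular_impuestos modelo "P" + 1500
  else if tipo == "R" then
    antiguedad * 1000
  else impuestos_base
termination_by (if tipo == "T" then 1 else 0)
decreasing_by simp_all

-- ===== PORT B =====
def calcular_impuestos_alt (modelo : Int) (tipo : String) : Int :=
  let antiguedad := 2024 - modelo
  if tipo == "R" then antiguedad * 1000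
  else if !(tipo == "P" || tipo == "T") then 0
  else
    let base : Int := if antiguedad < 10 then 2000 else if antiguedad < 20 then 1500 else 0
    base + (if tipo == "T" then 1500 else 0)

-- ===== PRECONDITION & SPEC =====
def Spec_calcular_impuestos (modelo : Int) (tipo : String) (out : Int) : Prop := out = calcular_impuestos_alt modelo tipo
instance (modelo : Int) (tipo : String) (out : Int) : Decidable (Spec_calcular_impuestos modelo tipo out) := by unfold Spec_calcular_impuestos; infer_instance

-- ===== CLAIM (what is proved, stated in full; the proofs are below) =====
def Claim_equal_calcular_impuestos : Prop := ∀ (modelo : Int) (tipo : String), Dom_calcular_impuestos modelo tipo → Spec_calcular_impuestos modelo tipo (calcular_impuestos modelo tipo)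

-- ===== LEMMAS AND PROOFS =====

-- ===== VERDICT (by name: the statement is the Claim_ definition above) =====
theorem calcular_impuestos_spec : Claim_equal_calcular_impuestos := by
  intro modelo tipo _
  unfold Spec_calcular_impuestos
  by_cases hP : tipo = "P" <;> by_cases hT : tipo = "T" <;> by_cases hR : tipo = "R" <;>
    simp_all [calcular_impuestos, calcular_impuestos_alt]
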